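-- pv_equiv track=rewrite | github.com/ahsan-007/Competitive-Programming | Hash Table/Easy/CountCommonWordsWithOneOccurrence.py | countWordsV2
-- ===== SOURCE A (Python) =====
-- from typing import List
-- from collections import Counter
--
-- def countWordsV2(words1: List[str], words2: List[str]) -> int:
--     map1 = Counter(words1)
--     map2 = Counter(words2)
--
--     count = 0
--     for word in map1:
--         if map1[word] == 1 and map2.get(word, 0) == 1:
--             count += 1
--
--     return count
-- ===== SOURCE B (Python) =====
-- from typing import List
--
--
-- def countWordsV2(words1: List[str], words2: List[str]) -> int:
--     # Sort-based: no Counter/dict/set.  In a sorted list a word occurs exactly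
--     # once iff it differs from both neighbours; each 'singles' list is strictly
--     # increasing, so after sorting their concatenation a word common to both
--     # shows up as exactly one adjacent equal pair.
--     def singles(ws):
--         ws = sorted(ws)
--         n = len(ws)
--         return [ws[i] for i in range(n)
--                 if (i == 0 or ws[i - 1] != ws[i]) and (i == n - 1 or ws[i + 1] != ws[i])]
--
--     merged = sorted(singles(words1) + singles(words2))
--     return sum(1 for i in range(1, len(merged)) if merged[i - 1] == merged[i])
-- ===== Notes on version B (the rewrite author's own statement) =====
-- stated objective: alternative
-- what changed: B drops the Counters entirely: it sorts each list, extracts exactly-once words by comparing sorted neighbours, and counts common singletons as adjacent equal pairs in the sorted concatenation of the two (nodup) singleton lists.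
import Mathlib
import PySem

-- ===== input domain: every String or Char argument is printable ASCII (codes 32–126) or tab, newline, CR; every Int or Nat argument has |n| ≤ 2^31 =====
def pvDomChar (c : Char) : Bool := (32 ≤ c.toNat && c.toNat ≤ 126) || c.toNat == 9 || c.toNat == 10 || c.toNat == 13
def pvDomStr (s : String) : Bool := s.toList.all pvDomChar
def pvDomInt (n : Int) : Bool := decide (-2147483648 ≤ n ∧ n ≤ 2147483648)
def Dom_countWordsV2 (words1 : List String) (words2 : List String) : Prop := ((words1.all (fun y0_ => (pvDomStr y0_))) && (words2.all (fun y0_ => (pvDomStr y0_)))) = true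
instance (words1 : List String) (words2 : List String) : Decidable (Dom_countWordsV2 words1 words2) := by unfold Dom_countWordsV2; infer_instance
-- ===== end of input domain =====

-- B replaces A's two Counters with a sort-based algorithm: sort each list, keep words that
-- differ from both sorted neighbours (the exactly-once words), and count common ones as
-- adjacent equal pairs in the sorted concatenation; alternative structure, similar cost.


-- ===== PORT A =====
-- Counter words1/words2; loop over map1's keys, count keys with count 1 in both maps.
def countWordsV2 (words1 : List String) (words2 : List String) : Int :=
  let map1 : PySem.Dict String Int := PySem.Dict.counter words1
  let map2 : PySem.Dict String Int := PySem.Dict.counter words2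
  map1.keys.foldl
    (fun count word =>
      if (map1.getD word 0 == 1 && map2.getD word 0 == 1) then count + 1 else count) 0

-- ===== PORT B =====
-- singles(ws): ws = sorted(ws); [ws[i] for i in range(n) if (i == 0 or ws[i-1] != ws[i]) and (i == n-1 or ws[i+1] != ws[i])]
-- (every index actually read is in range, so pyGetD's default "" is never consulted)
def pvSingles (ws : List String) : List String :=
  let s := PySem.List.sorted ws (fun x => x) false
  let n : Int := (s.length : Int)
  ((PySem.List.pyRange 0 n 1).filter (fun i =>
      (i == 0 || !(PySem.List.pyGetD s (i - 1) "" == PySem.List.pyGetD s i "")) &&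
      (i == n - 1 || !(PySem.List.pyGetD s (i + 1) "" == PySem.List.pyGetD s i "")))).map
    (fun i => PySem.List.pyGetD s i "")

-- merged = sorted(singles(words1) + singles(words2)); sum(1 for i in range(1, len(merged)) if merged[i-1] == merged[i])
def countWordsV2_alt (words1 : List String) (words2 : List String) : Int :=
  let merged := PySem.List.sorted (pvSingles words1 ++ pvSingles words2) (fun x => x) false
  (PySem.List.pyRange 1 (merged.length : Int) 1).foldl
    (fun acc i =>
      if PySem.List.pyGetD merged (i - 1) "" == PySem.List.pyGetD merged i "" then acc + 1 else acc) 0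

-- ===== PRECONDITION & SPEC =====
def Spec_countWordsV2 (words1 : List String) (words2 : List String) (out : Int) : Prop := out = countWordsV2_alt words1 words2
instance (words1 : List String) (words2 : List String) (out : Int) : Decidable (Spec_countWordsV2 words1 words2 out) := by unfold Spec_countWordsV2; infer_instance

-- ===== CLAIM (what is proved, stated in full; the proofs are below) =====
def Claim_equal_countWordsV2 : Prop := ∀ (words1 : List String) (words2 : List String), Dom_countWordsV2 words1 words2 → Spec_countWordsV2 words1 words2 (countWordsV2 words1 words2)

-- ===== LEMMAS AND PROOFS =====

-- Neighbour filter of the tail t of a sorted list whose previous element is p (Nat indices).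
def pvNF (p : String) (t : List String) : List String :=
  ((List.range t.length).filter (fun k =>
      (!((p :: t).getD k "" == t.getD k "")) &&
      (decide (k = t.length - 1) || !(t.getD (k + 1) "" == t.getD k "")))).map
    (fun k => t.getD k "")

-- The Nat-index form of B's neighbour comprehension.
def pvNbr (s : List String) : List String :=
  ((List.range s.length).filter (fun k =>
      (decide (k = 0) || !(s.getD (k - 1) "" == s.getD k "")) &&
      (decide (k = s.length - 1) || !(s.getD (k + 1) "" == s.getD k "")))).map
    (fun k => s.getD k "")

theorem pvNF_step (p y : String) (u : List String) :
    pvNF p (y :: u)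
      = (if (!(p == y)) && (decide (0 = u.length) || !(u.getD 0 "" == y)) then [y] else [])
          ++ pvNF y u := by
  unfold pvNF
  simp only [List.length_cons, Nat.add_sub_cancel]
  rw [List.range_succ_eq_map, List.filter_cons]
  have hcs : ∀ k ∈ List.range u.length,
      (((fun k => (!((p :: y :: u).getD k "" == (y :: u).getD k "")) &&
          (decide (k = u.length) || !((y :: u).getD (k + 1) "" == (y :: u).getD k ""))) ∘ Nat.succ) k)
      = ((fun k => (!((y :: u).getD k "" == u.getD k "")) &&
          (decide (k = u.length - 1) || !(u.getD (k + 1) "" == u.getD k ""))) k) := by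
    intro k hk
    have hklt : k < u.length := List.mem_range.mp hk
    simp only [Function.comp_apply, List.getD_cons_succ]
    congr 2
    exact decide_eq_decide.mpr (by omega)
  have hmain : ∀ l : List Nat,
      List.map (fun k => (y :: u).getD k "") (List.map Nat.succ l)
        = List.map (fun k => u.getD k "") l := by
    intro l
    rw [List.map_map]
    rfl
  have hc0 : ((!((p :: y :: u).getD 0 "" == (y :: u).getD 0 "")) &&
      (decide ((0:ℕ) = u.length) || !((y :: u).getD (0 + 1) "" == (y :: u).getD 0 "")))
      = ((!(p == y)) && (decide (0 = u.length) || !(u.getD 0 "" == y))) := by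
    simp
  rw [hc0]
  by_cases hb : ((!(p == y)) && (decide (0 = u.length) || !(u.getD 0 "" == y))) = true
  · rw [if_pos hb, if_pos hb, List.map_cons, List.filter_map, hmain, List.filter_congr hcs]
    simp
  · rw [if_neg hb, if_neg hb, List.filter_map, hmain, List.filter_congr hcs]
    simp

theorem pvNF_eq (t : List String) : ∀ (p : String),
    t.Pairwise (· ≤ ·) → (∀ y ∈ t, p ≤ y) →
    pvNF p t = t.filter (fun w => decide (t.count w = 1) && !(w == p)) := by
  induction t with
  | nil => intro p _ _; rfl
  | cons y u ih =>
    intro p hs hp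
    have hs' : u.Pairwise (· ≤ ·) := hs.tail
    have hyu : ∀ z ∈ u, y ≤ z := (List.pairwise_cons.mp hs).1
    have hpy : p ≤ y := hp y (by simp)
    -- y ∈ u iff u starts with y (u sorted, y a lower bound)
    have hymem : y ∈ u ↔ (u ≠ [] ∧ u.getD 0 "" = y) := by
      cases u with
      | nil => simp
      | cons a v =>
        simp only [List.getD_cons_zero, ne_eq, reduceCtorEq, not_false_iff, true_and]
        constructor
        · intro hm
          rcases List.mem_cons.mp hm with h1 | h1
          · exact h1.symm
          · have hav : ∀ z ∈ v, a ≤ z := (List.pairwise_cons.mp hs').1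
            exact le_antisymm (hav y h1) (hyu a (by simp))
        · intro h1; simp [h1]
    rw [pvNF_step, ih y hs' hyu, List.filter_cons]
    -- the two head conditions coincide
    have hhead : ((!(p == y)) && (decide (0 = u.length) || !(u.getD 0 "" == y)))
        = (decide ((y :: u).count y = 1) && !(y == p)) := by
      have h1 : (decide (0 = u.length) || !(u.getD 0 "" == y)) = decide (y ∉ u) := by
        cases u with
        | nil => simp
        | cons a v =>
          simp only [List.length_cons, List.getD_cons_zero]
          simp only [show ((0:ℕ) = v.length + 1) ↔ False from iff_false_intro (by omega),
            decide_false, Bool.false_or]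
          have hnm : y ∉ a :: v ↔ ¬ a = y := by
            rw [hymem]; simp [eq_comm]
          rw [decide_eq_decide.mpr hnm, beq_eq_decide a y]
          · simp
          · infer_instance
      have h2 : ((y :: u).count y = 1) ↔ y ∉ u := by
        rw [List.count_cons_self]
        constructor
        · intro h hm
          have := List.count_pos_iff.mpr hm
          omega
        · intro hm
          rw [List.count_eq_zero.mpr hm]
      rw [h1]
      have h3 : decide ((y :: u).count y = 1) = decide (y ∉ u) := decide_eq_decide.mpr h2
      rw [h3, Bool.and_comm]
      congr 1
      simp [BEq.comm]
    rw [hhead]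
    -- tail filters coincide on u
    have htail : u.filter (fun w => decide (u.count w = 1) && !(w == y))
        = u.filter (fun w => decide ((y :: u).count w = 1) && !(w == p)) := by
      apply List.filter_congr
      intro w hw
      by_cases hwy : w = y
      · subst hwy
        have : (w :: u).count w = u.count w + 1 := List.count_cons_self
        have hpos := List.count_pos_iff.mpr hw
        simp only [beq_self_eq_true, Bool.not_true, Bool.and_false]
        rw [this]
        have : decide ((u.count w + 1) = 1) = false := by simp; omega
        rw [this, Bool.false_and]
      · have hwp : ¬ w = p := by
          intro h
          have hw2 : w ≤ y := by rw [h]; exact hpy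
          exact hwy (le_antisymm hw2 (hyu w hw))
        have hc : (y :: u).count w = u.count w := by
          simp [show ¬ y = w from fun h => hwy h.symm]
        rw [hc, beq_eq_false_iff_ne.mpr hwy, beq_eq_false_iff_ne.mpr hwp]
    rw [htail]
    by_cases hb : (decide ((y :: u).count y = 1) && !(y == p)) = true
    · rw [if_pos hb, if_pos hb]; rfl
    · rw [if_neg hb, if_neg hb]; rfl

-- bridge from Python's Int indexing to Nat indexing
theorem pvSingles_eq_nbr (ws : List String) :
    pvSingles ws = pvNbr (PySem.List.sorted ws (fun x => x) false) := by
  unfold pvSingles pvNbr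
  dsimp only
  set s := PySem.List.sorted ws (fun x => x) false with hsdef
  rw [PySem.List.pyRange_zero_nat s.length, List.filter_map, List.map_map]
  have hmap : ((fun i => PySem.List.pyGetD s i "") ∘ fun k : Nat => (k : Int))
      = fun k : Nat => s.getD k "" := by
    funext k
    simp [PySem.List.pyGetD_natCast]
  rw [hmap]
  congr 1
  apply List.filter_congr
  intro k hk
  have hklt : k < s.length := List.mem_range.mp hk
  simp only [Function.comp_apply]
  congr 1
  · -- left factor
    by_cases hk0 : k = 0
    · subst hk0
      simp
    · have h1 : ((k : Int) == 0) = false := by simp [hk0]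
      have h2 : decide (k = 0) = false := by simp [hk0]
      rw [h1, h2, Bool.false_or, Bool.false_or]
      have h3 : ((k : Int) - 1) = ((k - 1 : Nat) : Int) := by omega
      rw [h3, PySem.List.pyGetD_natCast, PySem.List.pyGetD_natCast]
  · -- right factor
    have h4 : ((k : Int) == (s.length : Int) - 1) = decide (k = s.length - 1) := by
      rcases Bool.eq_false_or_eq_true (decide (k = s.length - 1)) with h | h
      · rw [h]
        have : k = s.length - 1 := by simpa using h
        simp only [beq_iff_eq]
        omega
      · rw [h]
        have : ¬ (k = s.length - 1) := by simpa using h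
        simp only [beq_eq_false_iff_ne, ne_eq]
        omega
    rw [h4]
    have h5 : ((k : Int) + 1) = ((k + 1 : Nat) : Int) := by omega
    rw [h5, PySem.List.pyGetD_natCast, PySem.List.pyGetD_natCast]

theorem pvNbr_cons (x : String) (t : List String) :
    pvNbr (x :: t)
      = (if (decide (0 = t.length) || !(t.getD 0 "" == x)) then [x] else []) ++ pvNF x t := by
  unfold pvNbr pvNF
  simp only [List.length_cons, Nat.add_sub_cancel]
  rw [List.range_succ_eq_map, List.filter_cons]
  have hcs : ∀ k ∈ List.range t.length,
      (((fun k => (decide (k = 0) || !((x :: t).getD (k - 1) "" == (x :: t).getD k "")) &&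
          (decide (k = t.length) || !((x :: t).getD (k + 1) "" == (x :: t).getD k ""))) ∘ Nat.succ) k)
      = ((fun k => (!((x :: t).getD k "" == t.getD k "")) &&
          (decide (k = t.length - 1) || !(t.getD (k + 1) "" == t.getD k ""))) k) := by
    intro k hk
    have hklt : k < t.length := List.mem_range.mp hk
    simp only [Function.comp_apply, List.getD_cons_succ, Nat.succ_eq_add_one, Nat.add_sub_cancel,
      show (k + 1 = 0) ↔ False from iff_false_intro (by omega), decide_false, Bool.false_or]
    rw [show decide (k + 1 = t.length) = decide (k = t.length - 1) from
      decide_eq_decide.mpr (by omega)]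
  have hmain : ∀ l : List Nat,
      List.map (fun k => (x :: t).getD k "") (List.map Nat.succ l)
        = List.map (fun k => t.getD k "") l := by
    intro l
    rw [List.map_map]
    rfl
  have hc0 : ((decide ((0:ℕ) = 0) || !((x :: t).getD (0 - 1) "" == (x :: t).getD 0 "")) &&
      (decide ((0:ℕ) = t.length) || !((x :: t).getD (0 + 1) "" == (x :: t).getD 0 "")))
      = ((decide (0 = t.length) || !(t.getD 0 "" == x))) := by
    simp
  rw [hc0]
  by_cases hb : ((decide (0 = t.length) || !(t.getD 0 "" == x))) = true
  · rw [if_pos hb, if_pos hb, List.map_cons, List.filter_map, hmain, List.filter_congr hcs]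
    simp
  · rw [if_neg hb, if_neg hb, List.filter_map, hmain, List.filter_congr hcs]
    simp

theorem pvNbr_sorted_eq (s : List String) (hs : s.Pairwise (· ≤ ·)) :
    pvNbr s = s.filter (fun w => decide (s.count w = 1)) := by
  cases s with
  | nil => rfl
  | cons x t =>
    have hs' : t.Pairwise (· ≤ ·) := hs.tail
    have hxu : ∀ z ∈ t, x ≤ z := (List.pairwise_cons.mp hs).1
    rw [pvNbr_cons, pvNF_eq t x hs' hxu, List.filter_cons]
    have hxmem : x ∈ t ↔ (t ≠ [] ∧ t.getD 0 "" = x) := by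
      cases t with
      | nil => simp
      | cons a v =>
        simp only [List.getD_cons_zero, ne_eq, reduceCtorEq, not_false_iff, true_and]
        constructor
        · intro hm
          rcases List.mem_cons.mp hm with h1 | h1
          · exact h1.symm
          · have hav : ∀ z ∈ v, a ≤ z := (List.pairwise_cons.mp hs').1
            exact le_antisymm (hav x h1) (hxu a (by simp))
        · intro h1; simp [h1]
    have hhead : (decide (0 = t.length) || !(t.getD 0 "" == x))
        = decide ((x :: t).count x = 1) := by
      have h2 : ((x :: t).count x = 1) ↔ x ∉ t := by
        rw [List.count_cons_self]
        constructor
        · intro h hm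
          have := List.count_pos_iff.mpr hm
          omega
        · intro hm
          rw [List.count_eq_zero.mpr hm]
      rw [show decide ((x :: t).count x = 1) = decide (x ∉ t) from decide_eq_decide.mpr h2]
      cases t with
      | nil => simp
      | cons a v =>
        simp only [List.length_cons, List.getD_cons_zero]
        simp only [show ((0:ℕ) = v.length + 1) ↔ False from iff_false_intro (by omega),
          decide_false, Bool.false_or]
        have hnm : x ∉ a :: v ↔ ¬ a = x := by
          rw [hxmem]; simp [eq_comm]
        rw [show decide (x ∉ a :: v) = decide (¬ a = x) from decide_eq_decide.mpr hnm,
          beq_eq_decide a x]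
        simp
    have htail : t.filter (fun w => decide (t.count w = 1) && !(w == x))
        = t.filter (fun w => decide ((x :: t).count w = 1)) := by
      apply List.filter_congr
      intro w hw
      by_cases hwx : w = x
      · subst hwx
        have hcc : (w :: t).count w = t.count w + 1 := List.count_cons_self
        have hpos := List.count_pos_iff.mpr hw
        simp only [beq_self_eq_true, Bool.not_true, Bool.and_false]
        rw [hcc]
        have : decide ((t.count w + 1) = 1) = false := by simp; omega
        rw [this]
      · have hc : (x :: t).count w = t.count w := by
          simp [show ¬ x = w from fun h => hwx h.symm]
        rw [hc, beq_eq_false_iff_ne.mpr hwx]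
        simp
    rw [hhead, htail]
    by_cases hb : (decide ((x :: t).count x = 1)) = true
    · rw [if_pos hb, if_pos hb]; rfl
    · rw [if_neg hb, if_neg hb]; rfl

theorem pvSingles_eq (ws : List String) :
    pvSingles ws
      = (PySem.List.sorted ws (fun x => x) false).filter (fun w => decide (ws.count w = 1)) := by
  rw [pvSingles_eq_nbr,
    pvNbr_sorted_eq _ (PySem.List.sorted_pairwise ws (fun x => x))]
  apply List.filter_congr
  intro w _
  exact decide_eq_decide.mpr (by rw [(PySem.List.sorted_perm ws (fun x => x) false).count_eq w])

theorem mem_pvSingles (ws : List String) (x : String) :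
    x ∈ pvSingles ws ↔ ws.count x = 1 := by
  rw [pvSingles_eq]
  simp only [List.mem_filter, decide_eq_true_eq]
  constructor
  · rintro ⟨_, h⟩; exact h
  · intro h
    refine ⟨?_, h⟩
    rw [PySem.List.mem_sorted]
    exact List.count_pos_iff.mp (by omega)

theorem nodup_pvSingles (ws : List String) : (pvSingles ws).Nodup := by
  rw [pvSingles_eq, List.nodup_iff_count_le_one]
  intro a
  by_cases h : ws.count a = 1
  · rw [List.count_filter (by simpa using h),
      (PySem.List.sorted_perm ws (fun x => x) false).count_eq a, h]
  · have hnm : a ∉ (PySem.List.sorted ws (fun x => x) false).filter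
        (fun w => decide (ws.count w = 1)) := by
      simp [List.mem_filter, h]
    rw [List.count_eq_zero.mpr hnm]
    exact Nat.zero_le 1

-- Adjacent equal pairs in a sorted list = length - number of distinct elements.
theorem adj_pairs_sorted (m : List String) (h : m.Pairwise (· ≤ ·)) :
    (List.range (m.length - 1)).countP (fun k => m.getD k "" == m.getD (k + 1) "")
      = m.length - m.dedup.length := by
  induction m with
  | nil => simp
  | cons x t ih =>
    match t, h with
    | [], _ => simp
    | y :: t, h =>
      have h' : (y :: t).Pairwise (· ≤ ·) := h.tail
      have ihh := ih h'
      have hle : (y :: t).dedup.length ≤ t.length + 1 := by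
        have := (List.dedup_sublist (y :: t)).length_le
        simpa using this
      have hcomp : ((fun k => (x :: y :: t).getD k "" == (x :: y :: t).getD (k + 1) "") ∘ Nat.succ)
          = (fun k => (y :: t).getD k "" == (y :: t).getD (k + 1) "") := by
        funext k; simp
      have hshift : (List.range ((x :: y :: t).length - 1)).countP
            (fun k => (x :: y :: t).getD k "" == (x :: y :: t).getD (k + 1) "")
          = (if x = y then 1 else 0)
            + (List.range ((y :: t).length - 1)).countP
                (fun k => (y :: t).getD k "" == (y :: t).getD (k + 1) "") := by
        have hlen : (x :: y :: t).length - 1 = ((y :: t).length - 1) + 1 := by simp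
        rw [hlen, List.range_succ_eq_map, List.countP_cons, List.countP_map, hcomp]
        by_cases hxy : x = y <;> simp [hxy] <;> omega
      by_cases hxy : x = y
      · rw [List.dedup_cons_of_mem (show x ∈ y :: t by simp [hxy]), hshift, ihh, if_pos hxy]
        simp only [List.length_cons]
        omega
      · have hnot : x ∉ y :: t := by
          intro hmem
          rcases List.mem_cons.mp hmem with h1 | h1
          · exact hxy h1
          · have hxley : x ≤ y := (List.pairwise_cons.mp h).1 y (by simp)
            have hylex : y ≤ x := (List.pairwise_cons.mp h').1 x h1
            exact hxy (le_antisymm hxley hylex)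
        rw [List.dedup_cons_of_notMem hnot, hshift, ihh, if_neg hxy]
        simp only [List.length_cons]
        omega

-- Inclusion–exclusion on two nodup lists.
theorem incl_excl (a b : List String) (ha : a.Nodup) (hb : b.Nodup) :
    a.length + b.length - (a ++ b).dedup.length = a.countP (fun x => decide (x ∈ b)) := by
  have h1 : (a ++ b).dedup.length = (a.toFinset ∪ b.toFinset).card := by
    rw [← List.card_toFinset, List.toFinset_append]
  have h2 : a.countP (fun x => decide (x ∈ b)) = (a.toFinset ∩ b.toFinset).card := by
    rw [List.countP_eq_length_filter, ← List.toFinset_card_of_nodup (ha.filter _)]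
    congr 1
    ext x
    simp [Finset.mem_inter]
  have h3 := Finset.card_union_add_card_inter a.toFinset b.toFinset
  rw [List.toFinset_card_of_nodup ha, List.toFinset_card_of_nodup hb] at h3
  omega

-- countP of a predicate implying membership agrees on two nodup lists with the same such members.
theorem countP_eq_of_mem_iff (p : String → Bool) (l1 l2 : List String)
    (h1 : l1.Nodup) (h2 : l2.Nodup) (h : ∀ x, p x = true → (x ∈ l1 ↔ x ∈ l2)) :
    l1.countP p = l2.countP p := by
  rw [List.countP_eq_length_filter, List.countP_eq_length_filter,
      ← List.toFinset_card_of_nodup (h1.filter p), ← List.toFinset_card_of_nodup (h2.filter p)]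
  congr 1
  ext x
  simp only [List.mem_toFinset, List.mem_filter]
  constructor
  · rintro ⟨hm, hp⟩; exact ⟨(h x hp).mp hm, hp⟩
  · rintro ⟨hm, hp⟩; exact ⟨(h x hp).mpr hm, hp⟩

-- B's fold over range(1, len(merged)) counts the adjacent equal pairs (Nat-index form).
theorem alt_fold_eq (m : List String) :
    (PySem.List.pyRange 1 (m.length : Int) 1).foldl
      (fun acc i =>
        if PySem.List.pyGetD m (i - 1) "" == PySem.List.pyGetD m i "" then acc + 1 else acc) 0
    = ((List.range (m.length - 1)).countP (fun k => m.getD k "" == m.getD (k + 1) "") : Int) := by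
  rw [PySem.List.foldl_count_if, zero_add, PySem.List.pyRange_one, List.countP_map]
  have hlen : (((m.length : Int) - 1)).toNat = m.length - 1 := by omega
  rw [hlen]
  congr 1
  apply List.countP_congr
  intro k _
  simp only [Function.comp_apply]
  have h1 : ((1 : Int) + (k : Int) - 1) = ((k : Nat) : Int) := by omega
  have h2 : ((1 : Int) + (k : Int)) = ((k + 1 : Nat) : Int) := by omega
  rw [h1, h2, PySem.List.pyGetD_natCast, PySem.List.pyGetD_natCast]

-- ===== VERDICT (by name: the statement is the Claim_ definition above) =====
theorem countWordsV2_spec : Claim_equal_countWordsV2 := by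
  intro words1 words2 _
  show countWordsV2 words1 words2 = countWordsV2_alt words1 words2
  -- A's side: count over the distinct words of words1
  unfold countWordsV2
  simp only [PySem.Dict.keys_counter, PySem.Dict.getD_counter, PySem.List.foldl_count_if, zero_add]
  -- B's side
  unfold countWordsV2_alt
  set a := pvSingles words1 with hadef
  set b := pvSingles words2 with hbdef
  set merged := PySem.List.sorted (a ++ b) (fun x => x) false with hmdef
  rw [alt_fold_eq merged,
    adj_pairs_sorted merged (PySem.List.sorted_pairwise (a ++ b) (fun x => x))]
  have hperm : merged.Perm (a ++ b) := PySem.List.sorted_perm (a ++ b) (fun x => x) false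
  have hlen : merged.length = a.length + b.length := by
    rw [hperm.length_eq, List.length_append]
  have hded : merged.dedup.length = (a ++ b).dedup.length := hperm.dedup.length_eq
  rw [hlen, hded, incl_excl a b (nodup_pvSingles words1) (nodup_pvSingles words2)]
  -- now both sides are countP's; align predicates and carrier lists
  have hstep1 : a.countP (fun x => decide (x ∈ b))
      = a.countP (fun word => ((words1.count word : Int) == 1 && (words2.count word : Int) == 1)) := by
    apply List.countP_congr
    intro w hw
    have hw1 : words1.count w = 1 := (mem_pvSingles words1 w).mp hw
    have e1 : ((words1.count w : Int) == 1) = true := by simp [hw1]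
    have e2 : ((words2.count w : Int) == 1) = decide (w ∈ b) := by
      rcases Bool.eq_false_or_eq_true (decide (w ∈ b)) with h | h
      · have : w ∈ b := by simpa using h
        have := (mem_pvSingles words2 w).mp this
        rw [h]
        simp [this]
      · have : ¬ w ∈ b := by simpa using h
        have h2 : ¬ words2.count w = 1 := fun hc => this ((mem_pvSingles words2 w).mpr hc)
        rw [h]
        simp only [beq_eq_false_iff_ne, ne_eq]
        exact_mod_cast h2
    rw [e1, Bool.true_and, e2]
  have hstep2 : a.countP (fun word => ((words1.count word : Int) == 1 && (words2.count word : Int) == 1))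
      = (PySem.Set.ofList words1).countP
          (fun word => ((words1.count word : Int) == 1 && (words2.count word : Int) == 1)) := by
    apply countP_eq_of_mem_iff _ _ _ (nodup_pvSingles words1) (PySem.Set.nodup_ofList words1)
    intro x hx
    have hx1 : words1.count x = 1 := by
      have := (Bool.and_eq_true _ _).mp hx
      have h1 := this.1
      simp only [beq_iff_eq] at h1
      exact_mod_cast h1
    rw [mem_pvSingles, PySem.Set.mem_ofList]
    constructor
    · intro _; exact List.count_pos_iff.mp (by omega)
    · intro _; exact hx1
  rw [hstep1, hstep2]
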